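-- pv_equiv track=rewrite | github.com/faemiyah/dnload | dnload/glsl_block_source.py | glsl_to_cstr_readable
-- ===== SOURCE A (Python) =====
-- def glsl_to_cstr_readable(op):
--     """Make GLSL source string into a 'readable' C string array."""
--     line = ""
--     ret = []
--     for ii in op:
--         if ";" == ii:
--             ret += [line + ii]
--             line = ""
--             continue
--         elif "\n" == ii:
--             ret += [line + "\\n"]
--             line = ""
--             continue
--         elif "{" == ii:
--             if line:
--                 ret += [line]
--             ret += ["{"]
--             line = ""
--             continue
--         elif "}" == ii:
--             if line:
--                 ret += [line]
--             ret += ["}"]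
--             line = ""
--             continue
--         line += ii
--     if line:
--         ret += [line]
--     return ret
-- ===== SOURCE B (Python) =====
-- def glsl_to_cstr_readable(op):
--     """Make GLSL source string into a 'readable' C string array."""
--     delims = ";\n{}"
--     ret = []
--     start = 0
--     n = len(op)
--     while start < n:
--         # scan to the next delimiter (span of non-delimiter characters)
--         i = start
--         while i < n and op[i] not in delims:
--             i += 1
--         pre = op[start:i]
--         if i == n:
--             # trailing run without delimiter; nonempty because start < n
--             ret.append(pre)
--             break
--         d = op[i]
--         if d == ';':
--             ret.append(pre + ';')
--         elif d == '\n':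
--             ret.append(pre + '\\n')
--         else:
--             if pre:
--                 ret.append(pre)
--             ret.append(d)
--         start = i + 1
--     return ret
-- ===== Notes on version B (the rewrite author's own statement) =====
-- stated objective: alternative
-- what changed: Replaces the per-character state machine with a growing accumulator string by a span-based scanner that jumps to the next delimiter and emits whole slices.
import Mathlib
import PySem

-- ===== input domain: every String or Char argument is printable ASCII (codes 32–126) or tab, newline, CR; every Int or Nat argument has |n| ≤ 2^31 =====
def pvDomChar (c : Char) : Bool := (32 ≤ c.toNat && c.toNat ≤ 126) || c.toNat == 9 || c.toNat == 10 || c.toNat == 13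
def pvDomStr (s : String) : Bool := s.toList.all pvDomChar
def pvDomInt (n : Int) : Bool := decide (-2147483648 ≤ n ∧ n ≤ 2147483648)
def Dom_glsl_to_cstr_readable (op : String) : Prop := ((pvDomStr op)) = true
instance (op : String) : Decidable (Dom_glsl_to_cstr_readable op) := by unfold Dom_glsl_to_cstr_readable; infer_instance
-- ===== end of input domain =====

-- B replaces A's per-character accumulator state machine by a span-based scanner
-- that jumps to the next delimiter and emits whole slices (objective: alternative).

-- ===== PORT A =====
-- one step of A's for-loop; state = (line, ret)
def pvAStep (st : List Char × List String) (ii : Char) : List Char × List String :=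
  if ii == ';' then ([], st.2 ++ [String.ofList (st.1 ++ [';'])])
  else if ii == '\n' then ([], st.2 ++ [String.ofList (st.1 ++ ['\\', 'n'])])
  else if ii == '{' then ([], (if st.1 = [] then st.2 else st.2 ++ [String.ofList st.1]) ++ [String.ofList ['{']])
  else if ii == '}' then ([], (if st.1 = [] then st.2 else st.2 ++ [String.ofList st.1]) ++ [String.ofList ['}']])
  else (st.1 ++ [ii], st.2)

def glsl_to_cstr_readable (op : String) : List String :=
  let r := op.toList.foldl pvAStep ([], [])
  if r.1 = [] then r.2 else r.2 ++ [String.ofList r.1]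

-- ===== PORT B =====
def pvIsDelim (c : Char) : Bool := c == ';' || c == '\n' || c == '{' || c == '}'

-- outer while-loop of Source B: span to the next delimiter, emit the slice, continue after it
def pvBGo : List Char → List String
  | [] => []
  | c :: cs0 =>
    let pre := (c :: cs0).takeWhile (fun x => !pvIsDelim x)
    match _h2 : (c :: cs0).dropWhile (fun x => !pvIsDelim x) with
    | [] => [String.ofList pre]
    | d :: rest =>
      (if d == ';' then [String.ofList (pre ++ [';'])]
       else if d == '\n' then [String.ofList (pre ++ ['\\', 'n'])]
       else (if pre = [] then [] else [String.ofList pre]) ++ [String.ofList [d]])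
      ++ pvBGo rest
  termination_by cs => cs.length
  decreasing_by
    have h := List.length_dropWhile_le (p := fun x => !pvIsDelim x) (l := c :: cs0)
    rw [_h2] at h
    simp at h ⊢
    omega

def glsl_to_cstr_readable_alt (op : String) : List String := pvBGo op.toList

-- ===== PRECONDITION & SPEC =====
def Spec_glsl_to_cstr_readable (op : String) (out : List String) : Prop := out = glsl_to_cstr_readable_alt op
instance (op : String) (out : List String) : Decidable (Spec_glsl_to_cstr_readable op out) := by unfold Spec_glsl_to_cstr_readable; infer_instance

-- ===== CLAIM (what is proved, stated in full; the proofs are below) =====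
def Claim_equal_glsl_to_cstr_readable : Prop := ∀ (op : String), Dom_glsl_to_cstr_readable op → Spec_glsl_to_cstr_readable op (glsl_to_cstr_readable op)

-- ===== LEMMAS AND PROOFS =====

-- proof-side restatement of A's loop as structural recursion on the remaining input
def pvE : List Char → List Char → List String
  | line, [] => if line = [] then [] else [String.ofList line]
  | line, c :: cs =>
    if c == ';' then String.ofList (line ++ [';']) :: pvE [] cs
    else if c == '\n' then String.ofList (line ++ ['\\', 'n']) :: pvE [] cs
    else if c == '{' then ((if line = [] then [] else [String.ofList line]) ++ [String.ofList ['{']]) ++ pvE [] cs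
    else if c == '}' then ((if line = [] then [] else [String.ofList line]) ++ [String.ofList ['}']]) ++ pvE [] cs
    else pvE (line ++ [c]) cs

def pvFin (r : List Char × List String) : List String :=
  if r.1 = [] then r.2 else r.2 ++ [String.ofList r.1]

theorem pvFold_eq_E (cs : List Char) : ∀ (line : List Char) (ret : List String),
    pvFin (cs.foldl pvAStep (line, ret)) = ret ++ pvE line cs := by
  induction cs with
  | nil => intro line ret; simp [pvFin, pvE]; split_ifs <;> simp
  | cons c cs ih =>
    intro line ret
    simp only [List.foldl_cons, pvE]
    by_cases h1 : c = ';'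
    · simp [pvAStep, h1, ih]
    · by_cases h2 : c = '\n'
      · simp [pvAStep, h1, h2, ih]
      · by_cases h3 : c = '{'
        · simp only [pvAStep, h1, h2, h3]
          simp [ih]
          split_ifs <;> simp
        · by_cases h4 : c = '}'
          · simp only [pvAStep, h1, h2, h3, h4]
            simp [ih]
            split_ifs <;> simp
          · simp [pvAStep, h1, h2, h3, h4, ih]

theorem pvTakeWhile_app {p : Char → Bool} (l : List Char) (c : Char) (r : List Char)
    (hl : ∀ a ∈ l, p a = true) (hc : p c = false) :
    (l ++ c :: r).takeWhile p = l ∧ (l ++ c :: r).dropWhile p = c :: r := by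
  induction l with
  | nil => simp [List.takeWhile, List.dropWhile, hc]
  | cons a l ih =>
    have ha : p a = true := hl a (by simp)
    have := ih (fun x hx => hl x (by simp [hx]))
    simp [List.takeWhile, List.dropWhile, ha, this]

theorem pvBGo_free (l : List Char) (hl : ∀ a ∈ l, pvIsDelim a = false) :
    pvBGo l = if l = [] then [] else [String.ofList l] := by
  cases l with
  | nil => simp [pvBGo]
  | cons c cs =>
    have htw : (c :: cs).takeWhile (fun x => !pvIsDelim x) = c :: cs := by
      apply List.takeWhile_eq_self_iff.mpr
      intro a ha; simp [hl a ha]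
    have hdw : (c :: cs).dropWhile (fun x => !pvIsDelim x) = [] := by
      have := List.takeWhile_append_dropWhile (p := fun x => !pvIsDelim x) (l := c :: cs)
      rw [htw] at this
      simpa using this
    rw [pvBGo]
    simp only [htw]
    split
    · rfl
    · rename_i d rest heq
      rw [hdw] at heq
      cases heq

theorem pvE_eq_BGo (cs : List Char) : ∀ (line : List Char),
    (∀ a ∈ line, pvIsDelim a = false) → pvE line cs = pvBGo (line ++ cs) := by
  induction cs with
  | nil =>
    intro line hl
    rw [List.append_nil, pvBGo_free line hl]
    simp [pvE]
  | cons c cs ih =>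
    intro line hl
    by_cases hd : pvIsDelim c = true
    · -- c is a delimiter: pvBGo spans exactly line, then handles c
      have hsp := pvTakeWhile_app (p := fun x => !pvIsDelim x) line c cs
        (fun a ha => by simp [hl a ha]) (by simp [hd])
      have hres : pvBGo (line ++ c :: cs) =
          (if c == ';' then [String.ofList (line ++ [';'])]
           else if c == '\n' then [String.ofList (line ++ ['\\', 'n'])]
           else (if line = [] then [] else [String.ofList line]) ++ [String.ofList [c]])
          ++ pvBGo cs := by
        cases hll : line ++ c :: cs with
        | nil => exact absurd hll (by simp)
        | cons y ys =>
          rw [pvBGo]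
          rw [← hll]
          simp only [hsp.1]
          split
          · rename_i heq
            rw [hsp.2] at heq
            cases heq
          · rename_i d rest heq
            rw [hsp.2] at heq
            injection heq with e1 e2
            subst e1; subst e2
            rfl
      rw [hres]
      have hIH := ih [] (by simp)
      simp only [List.nil_append] at hIH
      have hc4 : c = ';' ∨ c = '\n' ∨ c = '{' ∨ c = '}' := by
        have := hd; simp [pvIsDelim] at this; tauto
      rcases hc4 with h | h | h | h <;> subst h <;> simp [pvE, hIH]
    · -- c not a delimiter: it joins the span
      have hne : pvIsDelim c = false := by simpa using hd
      have hc1 : ¬ c = ';' := by intro h; simp [pvIsDelim, h] at hne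
      have hc2 : ¬ c = '\n' := by intro h; simp [pvIsDelim, h] at hne
      have hc3 : ¬ c = '{' := by intro h; simp [pvIsDelim, h] at hne
      have hc4 : ¬ c = '}' := by intro h; simp [pvIsDelim, h] at hne
      have hl' : ∀ a ∈ line ++ [c], pvIsDelim a = false := by
        intro a ha
        rcases List.mem_append.mp ha with h | h
        · exact hl a h
        · simp at h; simpa [h] using hne
      have := ih (line ++ [c]) hl'
      simpa [pvE, hc1, hc2, hc3, hc4] using this

-- ===== VERDICT (by name: the statement is the Claim_ definition above) =====
theorem glsl_to_cstr_readable_spec : Claim_equal_glsl_to_cstr_readable := by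
  intro op _
  unfold Spec_glsl_to_cstr_readable glsl_to_cstr_readable glsl_to_cstr_readable_alt
  have h := pvFold_eq_E op.toList [] []
  have h2 := pvE_eq_BGo op.toList [] (by simp)
  simp only [List.nil_append] at h2
  simpa [pvFin, h2] using h
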